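-- pv_equiv track=rewrite | github.com/bowiebrewster/CUDA-cowan | CheckConfigs.py | config_string_to_int
-- ===== SOURCE A (Python) =====
-- def config_string_to_int(configuration : str):
--     result = []
--
--     # Step 1: Identify character positions
--     char_positions = [i for i, c in enumerate(configuration) if c.isalpha()]
--
--     for idx, pos in enumerate(char_positions):
--         # Column 0: digit right before the character
--         num_before = int(configuration[pos - 1]) if pos > 0 and configuration[pos - 1].isdigit() else None
--
--         # Column 1: the character itself
--         l_map = {'s': 0, 'p': 1, 'd': 2, 'f': 3, 'g': 4, 'h': 5, 'i': 6, 'k': 7}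
--         char = l_map[configuration[pos]]
--
--         # Determine end of slice for column 2
--         if idx + 1 < len(char_positions):
--             next_pos = char_positions[idx + 1]
--             slice_end = max(pos + 1, next_pos - 1)
--         else:
--             slice_end = len(configuration)  # last character: go to end
--
--         # Column 2: digits from pos+1 up to slice_end
--         digits_after = ''.join([c for c in configuration[pos + 1:slice_end] if c.isdigit()])
--         third_col = int(digits_after) if digits_after else 1
--
--         result.append([num_before, char, third_col])
--
--     # Optional: propagate first digit in col 0 if consistent
--     first_val = result[0][0]
--     if all(row[0] == first_val for row in result if row[0] is not None):
--         for row in result: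
--             row[0] = first_val
--
--     return result
-- ===== SOURCE B (Python) =====
-- def config_string_to_int(configuration: str):
--     # Single left-to-right scan with a buffer of the characters seen since the
--     # last letter; the previous token's third column is finalized when the next
--     # letter (or the end of the string) is reached.
--     l_map = {'s': 0, 'p': 1, 'd': 2, 'f': 3, 'g': 4, 'h': 5, 'i': 6, 'k': 7}
--
--     def digits_val(chars):
--         ds = ''.join(ch for ch in chars if ch.isdigit())
--         return int(ds) if ds else 1
--
--     result = []
--     seg = ''  # characters accumulated since the last letter
--     for c in configuration:
--         if c.isalpha():
--             if result:
--                 # everything in seg except its last character (reserved as the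
--                 # possible single-digit prefix of the current letter)
--                 result[-1][2] = digits_val(seg[:-1])
--             num_before = int(seg[-1]) if seg and seg[-1].isdigit() else None
--             result.append([num_before, l_map[c], 1])
--             seg = ''
--         else:
--             seg += c
--     if not result:
--         return []
--     result[-1][2] = digits_val(seg)
--
--     # propagate first column if consistent
--     first_val = result[0][0]
--     if all(row[0] in (first_val, None) for row in result):
--         for row in result:
--             row[0] = first_val
--     return result
-- ===== Notes on version B (the rewrite author's own statement) =====
-- stated objective: alternative
-- what changed: Replaced the two-phase parser (collect all letter positions, then index and slice between consecutive positions) by a single left-to-right scan that buffers the characters seen since the last letter and finalizes the previous token when the next letter or the end of the string is reached.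
import Mathlib
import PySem

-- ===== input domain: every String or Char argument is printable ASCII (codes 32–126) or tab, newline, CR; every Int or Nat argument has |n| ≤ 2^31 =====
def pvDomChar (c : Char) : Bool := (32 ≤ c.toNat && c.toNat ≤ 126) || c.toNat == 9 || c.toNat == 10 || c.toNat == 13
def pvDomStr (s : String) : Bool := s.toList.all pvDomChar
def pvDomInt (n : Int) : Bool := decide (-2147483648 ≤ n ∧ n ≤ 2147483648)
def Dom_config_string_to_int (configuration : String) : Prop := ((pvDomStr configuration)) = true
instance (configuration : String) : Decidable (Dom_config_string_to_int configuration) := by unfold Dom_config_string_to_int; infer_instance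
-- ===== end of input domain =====

-- B re-implements the parse as a single left-to-right scan with a buffer of the characters
-- seen since the last letter, instead of A's 'collect letter positions, then slice between
-- consecutive positions' (objective: alternative; same return value on all of Pre_).

-- ===== PORT A =====
-- l_map lookup; the trailing 0 is the KeyError branch, excluded by Pre_
def pvLmap (c : Char) : Int :=
  if c = 's' then 0 else if c = 'p' then 1 else if c = 'd' then 2 else if c = 'f' then 3
  else if c = 'g' then 4 else if c = 'h' then 5 else if c = 'i' then 6 else if c = 'k' then 7 else 0

-- char_positions = [i for i, c in enumerate(configuration) if c.isalpha()]
def pvPositions (cs : List Char) : List Nat :=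
  cs.zipIdx.filterMap (fun p => if PySem.Chars.isalpha p.1 then some p.2 else none)

-- the body of A's main loop, for one (pos, idx) pair of enumerate(char_positions)
def pvRowA (cs : List Char) (char_positions : List Nat) (q : Nat × Nat) : List (Option Int) :=
  let pos := q.1
  let idx := q.2
  let num_before : Option Int :=
    if 0 < pos ∧ PySem.Chars.isdigit (cs.getD (pos - 1) ' ') = true then
      some ((PySem.Int.ofChars? [cs.getD (pos - 1) ' ']).getD 0)
    else none
  let ch : Int := pvLmap (cs.getD pos ' ')
  let slice_end : Nat :=
    if idx + 1 < char_positions.length then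
      max (pos + 1) (char_positions.getD (idx + 1) 0 - 1)
    else cs.length
  let digits_after : List Char :=
    (PySem.List.slice cs (some ((pos : Int) + 1)) (some (slice_end : Int))).filter PySem.Chars.isdigit
  let third_col : Int := if digits_after.isEmpty then 1 else (PySem.Int.ofChars? digits_after).getD 0
  [num_before, some ch, some third_col]

def config_string_to_int (configuration : String) : List (List (Option Int)) :=
  let cs := configuration.toList
  let char_positions := pvPositions cs
  let result := char_positions.zipIdx.map (pvRowA cs char_positions)
  match result with
  | [] => []   -- Python raises IndexError on result[0][0] here; excluded by Pre_
  | r0 :: _ =>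
    let first_val := r0.getD 0 none
    if result.all (fun row => !(row.getD 0 none).isSome || (row.getD 0 none == first_val)) then
      result.map (fun row => row.set 0 first_val)
    else result

-- ===== PORT B =====
def pvDigitsVal (chars : List Char) : Int :=
  let ds := chars.filter PySem.Chars.isdigit
  if ds.isEmpty then 1 else (PySem.Int.ofChars? ds).getD 0

def pvNumBefore (seg : List Char) : Option Int :=
  match seg.getLast? with
  | some d => if PySem.Chars.isdigit d then some ((PySem.Int.ofChars? [d]).getD 0) else none
  | none => none

-- the scan loop: reversed rows built so far, plus the buffer of chars since the last letter
def pvScan : List Char → List (List (Option Int)) → List Char → List (List (Option Int)) × List Char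
  | [], rev, seg => (rev, seg)
  | c :: rest, rev, seg =>
    if PySem.Chars.isalpha c then
      let rev' : List (List (Option Int)) :=
        match rev with
        | [] => []
        | r :: rs => r.set 2 (some (pvDigitsVal seg.dropLast)) :: rs
      pvScan rest ([pvNumBefore seg, some (pvLmap c), some 1] :: rev') []
    else
      pvScan rest rev (seg ++ [c])

def config_string_to_int_alt (configuration : String) : List (List (Option Int)) :=
  match pvScan configuration.toList [] [] with
  | ([], _) => []
  | (r :: rs, seg) =>
    let result := (r.set 2 (some (pvDigitsVal seg)) :: rs).reverse
    let first_val := (result.headD []).getD 0 none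
    if result.all (fun row => (row.getD 0 none == first_val) || !(row.getD 0 none).isSome) then
      result.map (fun row => row.set 0 first_val)
    else result

-- ===== PRECONDITION & SPEC =====
-- Pre_ excludes exactly the inputs where Python A raises: strings with no alphabetic
-- character (IndexError on result[0]) and strings with an alphabetic character outside
-- l_map = {s,p,d,f,g,h,i,k} (KeyError).
def Pre_config_string_to_int (configuration : String) : Prop :=
  configuration.toList.any PySem.Chars.isalpha = true ∧
  configuration.toList.all
    (fun c => !PySem.Chars.isalpha c ||
      (['s', 'p', 'd', 'f', 'g', 'h', 'i', 'k'] : List Char).contains c) = true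

instance (configuration : String) : Decidable (Pre_config_string_to_int configuration) := by
  unfold Pre_config_string_to_int; infer_instance

def pvWitness_config_string_to_int : String := "1s2"

def Spec_config_string_to_int (configuration : String) (out : List (List (Option Int))) : Prop :=
  out = config_string_to_int_alt configuration

instance (configuration : String) (out : List (List (Option Int))) : Decidable (Spec_config_string_to_int configuration out) := by
  unfold Spec_config_string_to_int; infer_instance

-- ===== CLAIM (what is proved, stated in full; the proofs are below) =====
def Claim_equal_config_string_to_int : Prop := ∀ (configuration : String), Dom_config_string_to_int configuration → Pre_config_string_to_int configuration → Spec_config_string_to_int configuration (config_string_to_int configuration)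

-- ===== LEMMAS AND PROOFS =====

-- an ASCII letter is not an ASCII digit
lemma pvAlphaNotDigit {c : Char} (h : PySem.Chars.isalpha c = true) :
    PySem.Chars.isdigit c = false := by
  unfold PySem.Chars.isalpha PySem.Chars.isupper PySem.Chars.islower at h
  unfold PySem.Chars.isdigit
  have h0 : '0'.val.toNat = 48 := rfl
  have h9 : '9'.val.toNat = 57 := rfl
  have hA : 'A'.val.toNat = 65 := rfl
  have hZ : 'Z'.val.toNat = 90 := rfl
  have ha : 'a'.val.toNat = 97 := rfl
  have hz : 'z'.val.toNat = 122 := rfl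
  simp only [Bool.or_eq_true, Bool.and_eq_true, decide_eq_true_eq, Char.le_def,
    UInt32.le_iff_toNat_le, Bool.and_eq_false_iff, decide_eq_false_iff_not, not_le] at *
  omega

-- split a string at its first letter
def pvSplit : List Char → Option (List Char × Char × List Char)
  | [] => none
  | c :: rest =>
    if PySem.Chars.isalpha c then some ([], c, rest)
    else (pvSplit rest).map (fun p => (c :: p.1, p.2.1, p.2.2))

lemma pvSplit_none : ∀ {cs : List Char}, pvSplit cs = none →
    ∀ c ∈ cs, PySem.Chars.isalpha c = false := by
  intro cs
  induction cs with
  | nil => intro _ c hc; cases hc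
  | cons c rest ih =>
    intro h d hd
    by_cases hc : PySem.Chars.isalpha c
    · rw [pvSplit, if_pos hc] at h; cases h
    · rw [pvSplit, if_neg hc] at h
      rw [Option.map_eq_none_iff] at h
      rcases List.mem_cons.mp hd with hd | hd
      · subst hd; simpa using hc
      · exact ih h d hd

lemma pvSplit_some : ∀ {cs s : List Char} {l : Char} {t : List Char},
    pvSplit cs = some (s, l, t) →
    cs = s ++ l :: t ∧ (∀ c ∈ s, PySem.Chars.isalpha c = false) ∧ PySem.Chars.isalpha l = true := by
  intro cs
  induction cs with
  | nil => intro s l t h; cases h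
  | cons c rest ih =>
    intro s l t h
    by_cases hc : PySem.Chars.isalpha c
    · rw [pvSplit, if_pos hc] at h
      have he := Option.some.inj h
      obtain ⟨e1, e2, e3⟩ : [] = s ∧ c = l ∧ rest = t := by
        simpa [Prod.ext_iff] using he
      subst e1; subst e2; subst e3
      exact ⟨rfl, ⟨(by intro d hd; exact absurd hd (List.not_mem_nil)), hc⟩⟩
    · rw [pvSplit, if_neg hc] at h
      rcases ho : pvSplit rest with _ | ⟨s', l', t'⟩
      · rw [ho] at h; cases h
      · rw [ho] at h
        have he := Option.some.inj h
        obtain ⟨e1, e2, e3⟩ : c :: s' = s ∧ l' = l ∧ t' = t := by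
          simpa [Prod.ext_iff] using he
        obtain ⟨hcs, hall, hl⟩ := ih ho
        subst e1; subst e2; subst e3
        refine ⟨by rw [hcs]; rfl, ?_, hl⟩
        intro d hd
        rcases List.mem_cons.mp hd with hd | hd
        · subst hd; simpa using hc
        · exact hall d hd

lemma pvSplit_length {cs s : List Char} {l : Char} {t : List Char}
    (h : pvSplit cs = some (s, l, t)) : t.length < cs.length := by
  have := (pvSplit_some h).1
  rw [this]
  simp
  omega

-- the third column of the token whose following characters start with cs,
-- given the buffer seg already pending
def pvThird (seg cs : List Char) : Int :=
  match pvSplit cs with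
  | none => pvDigitsVal (seg ++ cs)
  | some (s, _, _) => pvDigitsVal ((seg ++ s).dropLast)

-- the triples emitted from cs onwards, with pending buffer
def pvSpecRows (pending cs : List Char) : List (List (Option Int)) :=
  match hsp : pvSplit cs with
  | none => []
  | some (s, l, t) =>
      [pvNumBefore (pending ++ s), some (pvLmap l), some (pvThird [] t)] :: pvSpecRows [] t
termination_by cs.length
decreasing_by exact pvSplit_length hsp

lemma pvSpecRows_none {pending cs : List Char} (h : pvSplit cs = none) :
    pvSpecRows pending cs = [] := by
  conv_lhs => rw [pvSpecRows.eq_def]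
  split
  · rfl
  · rename_i s l t hsome
    rw [h] at hsome
    cases hsome

lemma pvSpecRows_some {pending cs s : List Char} {l : Char} {t : List Char}
    (h : pvSplit cs = some (s, l, t)) :
    pvSpecRows pending cs =
      [pvNumBefore (pending ++ s), some (pvLmap l), some (pvThird [] t)] :: pvSpecRows [] t := by
  conv_lhs => rw [pvSpecRows.eq_def]
  split
  · rename_i hnone
    rw [h] at hnone
    cases hnone
  · rename_i s' l' t' hsome
    rw [h] at hsome
    have he := Option.some.inj hsome
    obtain ⟨e1, e2, e3⟩ : s = s' ∧ l = l' ∧ t = t' := by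
      simpa [Prod.ext_iff] using he
    subst e1; subst e2; subst e3
    rfl

lemma pvThird_none {seg cs : List Char} (h : pvSplit cs = none) :
    pvThird seg cs = pvDigitsVal (seg ++ cs) := by
  unfold pvThird
  rw [h]

lemma pvThird_some {seg cs s : List Char} {l : Char} {t : List Char}
    (h : pvSplit cs = some (s, l, t)) :
    pvThird seg cs = pvDigitsVal ((seg ++ s).dropLast) := by
  unfold pvThird
  rw [h]

-- B side ------------------------------------------------------------------

def pvFinal : List (List (Option Int)) × List Char → List (List (Option Int))
  | ([], _) => []
  | (r :: rs, seg) => (r.set 2 (some (pvDigitsVal seg)) :: rs).reverse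

lemma scan_nonalpha : ∀ (s u : List Char) (rev : List (List (Option Int))) (seg : List Char),
    (∀ c ∈ s, PySem.Chars.isalpha c = false) →
    pvScan (s ++ u) rev seg = pvScan u rev (seg ++ s) := by
  intro s
  induction s with
  | nil => intro u rev seg _; simp
  | cons c s ih =>
    intro u rev seg h
    have hc : PySem.Chars.isalpha c = false := h c (by simp)
    simp only [List.cons_append, pvScan, hc, Bool.false_eq_true, if_false]
    rw [ih u rev (seg ++ [c]) (by intro d hd; exact h d (by simp [hd]))]
    simp

lemma scan_main : ∀ (n : Nat) (cs : List Char), cs.length ≤ n →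
    ∀ (r : List (Option Int)) (rs : List (List (Option Int))) (seg : List Char),
    pvFinal (pvScan cs (r :: rs) seg) =
      rs.reverse ++ [r.set 2 (some (pvThird seg cs))] ++ pvSpecRows seg cs := by
  intro n
  induction n with
  | zero =>
    intro cs hcs r rs seg
    have hnil : cs = [] := List.length_eq_zero_iff.mp (Nat.le_zero.mp hcs)
    subst hnil
    rw [pvSpecRows_none rfl, pvThird_none rfl]
    simp [pvScan, pvFinal]
  | succ n ih =>
    intro cs hcs r rs seg
    cases h : pvSplit cs with
    | none =>
      have hall := pvSplit_none h
      have h1 : pvScan cs (r :: rs) seg = (r :: rs, seg ++ cs) := by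
        have := scan_nonalpha cs [] (r :: rs) seg hall
        simpa using this
      rw [h1, pvSpecRows_none h, pvThird_none h]
      simp [pvFinal]
    | some p =>
      obtain ⟨s, l, t⟩ := p
      obtain ⟨hcs_eq, hsa, hl⟩ := pvSplit_some h
      have h1 : pvScan cs (r :: rs) seg =
          pvScan t ([pvNumBefore (seg ++ s), some (pvLmap l), some 1] ::
            (r.set 2 (some (pvDigitsVal (seg ++ s).dropLast)) :: rs)) [] := by
        rw [hcs_eq, scan_nonalpha s (l :: t) (r :: rs) seg hsa]
        simp [pvScan, hl]
      have hlen : t.length ≤ n := by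
        have h2 := pvSplit_length h
        omega
      rw [h1, ih t hlen _ _ _, pvSpecRows_some h, pvThird_some h]
      simp [List.set]

lemma rowsB_eq (cs : List Char) : pvFinal (pvScan cs [] []) = pvSpecRows [] cs := by
  cases h : pvSplit cs with
  | none =>
    have hall := pvSplit_none h
    have h1 : pvScan cs [] [] = ([], cs) := by
      have := scan_nonalpha cs [] [] [] hall
      simpa using this
    rw [h1, pvSpecRows_none h]
    rfl
  | some p =>
    obtain ⟨s, l, t⟩ := p
    obtain ⟨hcs_eq, hsa, hl⟩ := pvSplit_some h
    have h1 : pvScan cs [] [] =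
        pvScan t [[pvNumBefore s, some (pvLmap l), some 1]] [] := by
      rw [hcs_eq, scan_nonalpha s (l :: t) [] [] hsa]
      simp [pvScan, hl]
    rw [h1, scan_main t.length t le_rfl _ [] [], pvSpecRows_some h]
    simp [List.set]

-- A side ------------------------------------------------------------------

lemma posShift (t : List Char) : ∀ n : Nat,
    ((t.zipIdx n).filterMap (fun p => if PySem.Chars.isalpha p.1 then some p.2 else none)) =
      ((t.zipIdx).filterMap (fun p => if PySem.Chars.isalpha p.1 then some p.2 else none)).map (· + n) := by
  induction t with
  | nil => intro n; simp
  | cons c t ih =>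
    intro n
    rw [show ((c :: t : List Char)).zipIdx = (c :: t).zipIdx 0 from rfl]
    rw [List.zipIdx_cons, List.zipIdx_cons]
    simp only [List.filterMap_cons]
    by_cases hc : PySem.Chars.isalpha c
    · simp only [hc, if_true, ih (n + 1), ih 1, List.map_cons, List.map_map]
      refine List.cons_eq_cons.mpr ⟨by omega, List.map_congr_left ?_⟩
      intro x _
      simp only [Function.comp_apply]
      omega
    · simp only [hc, Bool.false_eq_true, if_false, ih (n + 1), ih 1, List.map_map]
      refine List.map_congr_left ?_
      intro x _
      simp only [Function.comp_apply]
      omega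

lemma positions_eq_nil {cs : List Char} (h : ∀ c ∈ cs, PySem.Chars.isalpha c = false) :
    pvPositions cs = [] := by
  induction cs with
  | nil => rfl
  | cons c t ih =>
    unfold pvPositions at *
    rw [show ((c :: t : List Char)).zipIdx = (c :: t).zipIdx 0 from rfl, List.zipIdx_cons]
    simp only [List.filterMap_cons, h c (by simp), Bool.false_eq_true, if_false]
    rw [posShift t 1, ih (by intro d hd; exact h d (by simp [hd]))]
    simp

lemma positions_decomp : ∀ (s : List Char) (l : Char) (t : List Char),
    (∀ c ∈ s, PySem.Chars.isalpha c = false) → PySem.Chars.isalpha l = true →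
    pvPositions (s ++ l :: t) = s.length :: (pvPositions t).map (· + (s.length + 1)) := by
  intro s
  induction s with
  | nil =>
    intro l t _ hl
    unfold pvPositions
    rw [List.nil_append, show ((l :: t : List Char)).zipIdx = (l :: t).zipIdx 0 from rfl,
      List.zipIdx_cons]
    simp only [List.filterMap_cons, hl, if_true]
    rw [posShift t 1]
    simp

  | cons c s ih =>
    intro l t h hl
    have hc : PySem.Chars.isalpha c = false := h c (by simp)
    have hrest := ih l t (by intro d hd; exact h d (by simp [hd])) hl
    unfold pvPositions at *
    rw [List.cons_append,
      show ((c :: (s ++ l :: t) : List Char)).zipIdx = (c :: (s ++ l :: t)).zipIdx 0 from rfl,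
      List.zipIdx_cons]
    simp only [List.filterMap_cons, hc, Bool.false_eq_true, if_false]
    rw [posShift (s ++ l :: t) 1, hrest]
    simp only [List.map_cons, List.map_map, List.length_cons]
    refine List.cons_eq_cons.mpr ⟨by omega, List.map_congr_left ?_⟩
    intro x _
    simp only [Function.comp_apply]
    omega

lemma pvGetD_shift (s : List Char) (l : Char) (t : List Char) (m : Nat) (d : Char) :
    (s ++ l :: t).getD (m + (s.length + 1)) d = t.getD m d := by
  rw [List.getD_eq_getElem?_getD, List.getD_eq_getElem?_getD,
    List.getElem?_append_right (by omega)]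
  congr 1
  rw [show m + (s.length + 1) - s.length = m + 1 by omega]
  exact List.getElem?_cons_succ ..

lemma pvGetD_at_len (s : List Char) (l : Char) (t : List Char) (d : Char) :
    (s ++ l :: t).getD s.length d = l := by
  rw [List.getD_eq_getElem?_getD, List.getElem?_append_right le_rfl]
  simp

lemma pvDrop_shift (s : List Char) (l : Char) (t : List Char) (m : Nat) :
    (s ++ l :: t).drop (m + (s.length + 1)) = t.drop m := by
  rw [show m + (s.length + 1) = s.length + (m + 1) by omega,
    List.drop_length_add_append, List.drop_succ_cons]

lemma sliceNat (cs : List Char) (a b : Nat) :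
    PySem.List.slice cs (some ((a : Nat) : Int)) (some ((b : Nat) : Int)) =
      List.take (b - a) (List.drop a cs) := by
  simp [pysem]

lemma castSucc (pos : Nat) : ((pos : Nat) : Int) + 1 = (((pos + 1 : Nat)) : Int) := by
  push_cast
  ring

lemma rowA_shift (s : List Char) (l : Char) (t : List Char)
    (hs : ∀ c ∈ s, PySem.Chars.isalpha c = false) (hl : PySem.Chars.isalpha l = true)
    (pos idx : Nat) :
    pvRowA (s ++ l :: t) (pvPositions (s ++ l :: t)) (pos + (s.length + 1), idx + 1) =
      pvRowA t (pvPositions t) (pos, idx) := by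
  have hdec := positions_decomp s l t hs hl
  have hlen : (pvPositions (s ++ l :: t)).length = (pvPositions t).length + 1 := by
    rw [hdec]; simp
  simp only [pvRowA]
  -- num_before components agree
  have hnb :
      (if 0 < pos + (s.length + 1) ∧
          PySem.Chars.isdigit ((s ++ l :: t).getD (pos + (s.length + 1) - 1) ' ') = true then
        some ((PySem.Int.ofChars? [(s ++ l :: t).getD (pos + (s.length + 1) - 1) ' ']).getD 0)
      else none) =
      (if 0 < pos ∧ PySem.Chars.isdigit (t.getD (pos - 1) ' ') = true then
        some ((PySem.Int.ofChars? [t.getD (pos - 1) ' ']).getD 0)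
      else none) := by
    cases pos with
    | zero =>
      have hg : (s ++ l :: t).getD (0 + (s.length + 1) - 1) ' ' = l := by
        rw [show 0 + (s.length + 1) - 1 = s.length by omega]
        exact pvGetD_at_len s l t ' '
      rw [hg]
      simp [pvAlphaNotDigit hl]
    | succ p =>
      have hg : (s ++ l :: t).getD (p + 1 + (s.length + 1) - 1) ' ' = t.getD p ' ' := by
        rw [show p + 1 + (s.length + 1) - 1 = p + (s.length + 1) by omega]
        exact pvGetD_shift s l t p ' '
      rw [hg]
      simp only [Nat.add_sub_cancel]
      have h1 : 0 < p + 1 + (s.length + 1) := by omega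
      have h2 : 0 < p + 1 := by omega
      simp [h1, h2]
  -- the character itself agrees
  have hch : (s ++ l :: t).getD (pos + (s.length + 1)) ' ' = t.getD pos ' ' :=
    pvGetD_shift s l t pos ' '
  rw [hnb, hch]
  simp only [List.cons.injEq, and_true, true_and, Option.some.injEq]
  -- third column agrees
  by_cases hc : idx + 1 < (pvPositions t).length
  · have hcL : idx + 1 + 1 < (pvPositions (s ++ l :: t)).length := by omega
    rw [if_pos hcL, if_pos hc]
    have hgp : (pvPositions (s ++ l :: t)).getD (idx + 1 + 1) 0 =
        (pvPositions t).getD (idx + 1) 0 + (s.length + 1) := by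
      rw [hdec, List.getD_cons_succ, List.getD_eq_getElem?_getD, List.getD_eq_getElem?_getD,
        List.getElem?_map, List.getElem?_eq_getElem hc]
      simp
    rw [hgp]
    rw [castSucc, castSucc, sliceNat, sliceNat]
    rw [show pos + (s.length + 1) + 1 = pos + 1 + (s.length + 1) by omega]
    rw [pvDrop_shift s l t (pos + 1)]
    rw [show max (pos + 1 + (s.length + 1)) ((pvPositions t).getD (idx + 1) 0 + (s.length + 1) - 1)
        - (pos + 1 + (s.length + 1))
      = max (pos + 1) ((pvPositions t).getD (idx + 1) 0 - 1) - (pos + 1) by omega]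
  · have hcL : ¬ (idx + 1 + 1 < (pvPositions (s ++ l :: t)).length) := by omega
    rw [if_neg hcL, if_neg hc]
    rw [castSucc, castSucc, sliceNat, sliceNat]
    rw [show pos + (s.length + 1) + 1 = pos + 1 + (s.length + 1) by omega]
    rw [pvDrop_shift s l t (pos + 1)]
    rw [show (s ++ l :: t).length - (pos + 1 + (s.length + 1))
      = t.length - (pos + 1) by simp; omega]

lemma rowA_head (s : List Char) (l : Char) (t : List Char)
    (hs : ∀ c ∈ s, PySem.Chars.isalpha c = false) (hl : PySem.Chars.isalpha l = true) :
    pvRowA (s ++ l :: t) (pvPositions (s ++ l :: t)) (s.length, 0) =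
      [pvNumBefore s, some (pvLmap l), some (pvThird [] t)] := by
  have hdec := positions_decomp s l t hs hl
  simp only [pvRowA]
  -- num_before
  have hnb :
      (if 0 < s.length ∧
          PySem.Chars.isdigit ((s ++ l :: t).getD (s.length - 1) ' ') = true then
        some ((PySem.Int.ofChars? [(s ++ l :: t).getD (s.length - 1) ' ']).getD 0)
      else none) = pvNumBefore s := by
    cases hse : s.getLast? with
    | none =>
      have : s = [] := List.getLast?_eq_none_iff.mp hse
      subst this
      simp [pvNumBefore]
    | some d =>
      have hne : s ≠ [] := by
        intro h'
        subst h'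
        cases hse
      have hpos : 0 < s.length := List.length_pos_iff.mpr hne
      have hg : (s ++ l :: t).getD (s.length - 1) ' ' = d := by
        rw [List.getD_eq_getElem?_getD, List.getElem?_append_left (by omega)]
        rw [← List.getLast?_eq_getElem?, hse]
        rfl
      rw [hg]
      unfold pvNumBefore
      rw [hse]
      simp [hpos]
  -- the character
  have hch : (s ++ l :: t).getD s.length ' ' = l := pvGetD_at_len s l t ' '
  rw [hnb, hch]
  simp only [List.cons.injEq, and_true, true_and, Option.some.injEq]
  -- third column
  cases ht : pvSplit t with
  | none =>
    have hPt : pvPositions t = [] := positions_eq_nil (pvSplit_none ht)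
    have hcL : ¬ (0 + 1 < (pvPositions (s ++ l :: t)).length) := by
      rw [hdec, hPt]; simp
    rw [if_neg hcL, pvThird_none ht]
    rw [castSucc, sliceNat]
    rw [show (s ++ l :: t).drop (s.length + 1) = t by
      have hd0 := pvDrop_shift s l t 0
      simpa using hd0]
    rw [show (s ++ l :: t).length - (s.length + 1) = t.length by simp; omega]
    rw [List.take_length]
    simp [pvDigitsVal]
  | some p =>
    obtain ⟨s', l', t'⟩ := p
    obtain ⟨ht_eq, hs'a, hl'⟩ := pvSplit_some ht
    have hPt : pvPositions t = s'.length :: (pvPositions t').map (· + (s'.length + 1)) := by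
      rw [ht_eq]
      exact positions_decomp s' l' t' hs'a hl'
    have hcL : 0 + 1 < (pvPositions (s ++ l :: t)).length := by
      rw [hdec, hPt]; simp
    rw [if_pos hcL, pvThird_some ht]
    have hgp : (pvPositions (s ++ l :: t)).getD (0 + 1) 0 = s'.length + (s.length + 1) := by
      rw [hdec, List.getD_cons_succ, hPt]
      simp
    rw [hgp]
    rw [castSucc, sliceNat]
    rw [show (s ++ l :: t).drop (s.length + 1) = t by
      have hd0 := pvDrop_shift s l t 0
      simpa using hd0]
    rw [show max (s.length + 1) (s'.length + (s.length + 1) - 1) - (s.length + 1)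
      = s'.length - 1 by omega]
    rw [ht_eq, List.take_append_of_le_length (by omega)]
    rw [show s'.take (s'.length - 1) = s'.dropLast from List.dropLast_eq_take.symm]
    simp [pvDigitsVal]

lemma zipIdxMapShift (k : Nat) (xs : List Nat) : ∀ n : Nat,
    (xs.map (· + k)).zipIdx (n + 1) = (xs.zipIdx n).map (fun q => (q.1 + k, q.2 + 1)) := by
  induction xs with
  | nil => intro n; simp
  | cons x xs ih =>
    intro n
    simp only [List.map_cons, List.zipIdx_cons, ih (n + 1)]

def pvRowsA (cs : List Char) : List (List (Option Int)) :=
  (pvPositions cs).zipIdx.map (pvRowA cs (pvPositions cs))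

lemma rowsA_eq_spec : ∀ (n : Nat) (cs : List Char), cs.length ≤ n →
    pvRowsA cs = pvSpecRows [] cs := by
  intro n
  induction n with
  | zero =>
    intro cs hcs
    have hnil : cs = [] := List.length_eq_zero_iff.mp (Nat.le_zero.mp hcs)
    subst hnil
    rw [pvSpecRows_none rfl]
    rfl
  | succ n ih =>
    intro cs hcs
    cases h : pvSplit cs with
    | none =>
      rw [pvSpecRows_none h]
      unfold pvRowsA
      rw [positions_eq_nil (pvSplit_none h)]
      rfl
    | some p =>
      obtain ⟨s, l, t⟩ := p
      obtain ⟨hcs_eq, hsa, hl⟩ := pvSplit_some h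
      have hdec := positions_decomp s l t hsa hl
      rw [pvSpecRows_some h]
      unfold pvRowsA
      subst hcs_eq
      rw [hdec, show ((s.length :: (pvPositions t).map (· + (s.length + 1))) : List Nat).zipIdx
          = (s.length :: (pvPositions t).map (· + (s.length + 1))).zipIdx 0 from rfl,
        List.zipIdx_cons, List.map_cons, ← hdec]
      rw [rowA_head s l t hsa hl]
      refine List.cons_eq_cons.mpr ⟨by simp, ?_⟩
      rw [zipIdxMapShift (s.length + 1) (pvPositions t) 0]
      rw [List.map_map]
      have hmap : ((pvPositions t).zipIdx 0).map
            ((pvRowA (s ++ l :: t) (pvPositions (s ++ l :: t))) ∘ (fun q => (q.1 + (s.length + 1), q.2 + 1)))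
          = ((pvPositions t).zipIdx 0).map (pvRowA t (pvPositions t)) := by
        refine List.map_congr_left ?_
        intro q _
        simp only [Function.comp_apply]
        have := rowA_shift s l t hsa hl q.1 q.2
        simpa using this
      rw [hmap]
      have hlt : t.length ≤ n := by
        simp only [List.length_append, List.length_cons] at hcs
        omega
      exact ih t hlt

-- final assembly -----------------------------------------------------------

lemma pvOrComm (fv : Option Int) :
    (fun row : List (Option Int) => !(row.getD 0 none).isSome || (row.getD 0 none == fv)) =
      (fun row : List (Option Int) => (row.getD 0 none == fv) || !(row.getD 0 none).isSome) := by
  funext row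
  exact Bool.or_comm _ _

-- ===== VERDICT (by name: the statement is the Claim_ definition above) =====
theorem config_string_to_int_spec : Claim_equal_config_string_to_int := by
  intro configuration _ _
  simp only [Spec_config_string_to_int, config_string_to_int, config_string_to_int_alt]
  have hA : (pvPositions configuration.toList).zipIdx.map
        (pvRowA configuration.toList (pvPositions configuration.toList))
      = pvSpecRows [] configuration.toList :=
    rowsA_eq_spec configuration.toList.length configuration.toList le_rfl
  have hBfull := rowsB_eq configuration.toList
  rcases hscan : pvScan configuration.toList [] [] with ⟨rev, seg⟩
  rw [hscan] at hBfull
  rw [hA]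
  cases rev with
  | nil =>
    have hspec : pvSpecRows [] configuration.toList = [] := by
      simpa [pvFinal] using hBfull.symm
    rw [hspec]
  | cons r rs =>
    have hres : (r.set 2 (some (pvDigitsVal seg)) :: rs).reverse
        = pvSpecRows [] configuration.toList := by
      simpa [pvFinal] using hBfull
    conv_rhs => whnf
    rw [hres]
    cases hS : pvSpecRows [] configuration.toList with
    | nil =>
      rw [hS] at hres
      simp at hres
    | cons a as =>
      simp only [List.headD_cons, pvOrComm (a.getD 0 none)]
      rfl
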